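-- pv_equiv track=rewrite | github.com/waldosax/PlexSports | PlexSportsAgent.bundle/Contents/Code/Matching.py | Chew
-- ===== SOURCE A (Python) =====
-- CHUNK_BOILED_INDEX = 0
--
-- CHUNK_NEXT_FOOD_INDEX = 3
--
-- def Chew(chunks, grit, food):
--     """Reconstitutes a food string, given a list of chunks and a grit mapping, removing the specified chunks."""
--     bites = []
--     foodIndex = 0
--     for chunk in chunks:
--         if chunk:
--             bites.append(food[foodIndex:grit[chunk[CHUNK_BOILED_INDEX]]])
--             foodIndex = chunk[CHUNK_NEXT_FOOD_INDEX]
--     bites.append(food[foodIndex:])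
--
--     return "".join(bites)
-- ===== SOURCE B (Python) =====
-- CHUNK_BOILED_INDEX = 0
--
-- CHUNK_NEXT_FOOD_INDEX = 3
--
-- def Chew(chunks, grit, food):
--     """Two-phase rewrite: first tabulate all cut points, then stitch the kept
--     spans back together by pairing consecutive cut points."""
--     cuts = [0]
--     for chunk in chunks:
--         if chunk:
--             cuts.append(grit[chunk[CHUNK_BOILED_INDEX]])
--             cuts.append(chunk[CHUNK_NEXT_FOOD_INDEX])
--     cuts.append(len(food))
--     it = iter(cuts)
--     return "".join(food[a:b] for a, b in zip(it, it))
-- ===== Notes on version B (the rewrite author's own statement) =====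
-- stated objective: alternative
-- what changed: B separates the work into two phases: it first builds a flat table of cut points (start/stop boundaries) without touching the string, then assembles the result in a pairwise zip pass over that table, instead of A's single loop that slices while carrying a running index.
-- outside the precondition, e.g. on Chew([('x', 0, 0, 1)], {}, 'ab'): A raises KeyError, B raises KeyError
import Mathlib
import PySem

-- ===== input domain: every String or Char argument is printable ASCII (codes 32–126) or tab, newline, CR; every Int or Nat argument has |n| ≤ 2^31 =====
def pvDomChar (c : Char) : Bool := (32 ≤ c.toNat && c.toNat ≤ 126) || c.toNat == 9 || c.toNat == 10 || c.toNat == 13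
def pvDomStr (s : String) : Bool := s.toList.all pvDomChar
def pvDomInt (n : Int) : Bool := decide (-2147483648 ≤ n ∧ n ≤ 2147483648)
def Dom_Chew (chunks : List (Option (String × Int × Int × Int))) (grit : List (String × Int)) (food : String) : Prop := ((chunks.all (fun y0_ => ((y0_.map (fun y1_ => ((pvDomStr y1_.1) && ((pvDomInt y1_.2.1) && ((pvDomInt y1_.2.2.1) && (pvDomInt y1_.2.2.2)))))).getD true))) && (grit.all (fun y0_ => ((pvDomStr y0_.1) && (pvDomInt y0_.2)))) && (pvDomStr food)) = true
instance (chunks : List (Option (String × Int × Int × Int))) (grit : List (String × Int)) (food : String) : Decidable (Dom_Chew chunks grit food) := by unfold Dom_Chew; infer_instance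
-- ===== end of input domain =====

-- B rebuilds the string in two phases (a flat cut-point table, then a pairwise zip pass)
-- instead of A's single slicing loop with a running index; objective: alternative decomposition.


-- ===== PORT A =====
-- A's loop: carry (bites, foodIndex); grit[...] is a dict lookup (KeyError excluded by Pre_,
-- so the .getD 0 default is never observed inside Pre_).
def Chew (chunks : List (Option (String × Int × Int × Int))) (grit : List (String × Int)) (food : String) : String :=
  let d := PySem.Dict.ofList grit
  let st := chunks.foldl (fun (st : List String × Int) chunk =>
    match chunk with
    | some c => (st.1 ++ [PySem.Str.slice food (some st.2) (some ((PySem.Dict.get? d c.1).getD 0))], c.2.2.2)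
    | none => st) ([], 0)
  PySem.Str.join "" (st.1 ++ [PySem.Str.slice food (some st.2) none])

-- ===== PORT B =====
-- zip(it, it) over the cut list = consume the list two at a time.
def pvPairSlices (food : String) : List Int → List String
  | a :: b :: rest => PySem.Str.slice food (some a) (some b) :: pvPairSlices food rest
  | _ => []

def Chew_alt (chunks : List (Option (String × Int × Int × Int))) (grit : List (String × Int)) (food : String) : String :=
  let d := PySem.Dict.ofList grit
  let cuts := chunks.foldl (fun (acc : List Int) chunk =>
    match chunk with
    | some c => acc ++ [(PySem.Dict.get? d c.1).getD 0, c.2.2.2]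
    | none => acc) [0]
  PySem.Str.join "" (pvPairSlices food (cuts ++ [PySem.Str.len food]))

-- ===== PRECONDITION & SPEC =====
-- Pre_ excludes exactly the inputs where Python A raises KeyError: a non-None chunk whose
-- boiled key is absent from grit (Python B raises there too).
def Pre_Chew (chunks : List (Option (String × Int × Int × Int))) (grit : List (String × Int)) (food : String) : Prop :=
  ∀ c ∈ chunks, ∀ t, c = some t → t.1 ∈ grit.map Prod.fst
instance (chunks : List (Option (String × Int × Int × Int))) (grit : List (String × Int)) (food : String) : Decidable (Pre_Chew chunks grit food) := by unfold Pre_Chew; infer_instance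

def pvWitness_Chew : (List (Option (String × Int × Int × Int))) × (List (String × Int)) × String :=
  ([some ("a", 0, 0, 1), none], [("a", 2)], "hello")

def Spec_Chew (chunks : List (Option (String × Int × Int × Int))) (grit : List (String × Int)) (food : String) (out : String) : Prop := out = Chew_alt chunks grit food
instance (chunks : List (Option (String × Int × Int × Int))) (grit : List (String × Int)) (food : String) (out : String) : Decidable (Spec_Chew chunks grit food out) := by unfold Spec_Chew; infer_instance

-- ===== CLAIM (what is proved, stated in full; the proofs are below) =====
def Claim_equal_Chew : Prop := ∀ (chunks : List (Option (String × Int × Int × Int))) (grit : List (String × Int)) (food : String), Dom_Chew chunks grit food → Pre_Chew chunks grit food → Spec_Chew chunks grit food (Chew chunks grit food)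

-- ===== LEMMAS AND PROOFS =====

-- a slice whose stop is exactly len(s) equals the open-ended slice
theorem pvSlice_len_eq_none {α : Type} (xs : List α) (a : Int) :
    PySem.List.slice xs (some a) (some (xs.length : Int)) = PySem.List.slice xs (some a) none := by
  simp [PySem.List.slice, PySem.List.clampIdx]
  split_ifs <;> omega

theorem pvStrSlice_len_eq_none (s : String) (a : Int) :
    PySem.Str.slice s (some a) (some ((s.length : Int))) = PySem.Str.slice s (some a) none := by
  simp only [PySem.Str.slice, PySem.Chars.slice_eq_listSlice]
  rw [show ((s.length : Int)) = ((s.toList.length : Int)) by simp, pvSlice_len_eq_none]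

-- A's fold: the bites accumulator only grows by appending
theorem pvFoldA_acc (food : String) (d : PySem.Dict String Int)
    (chunks : List (Option (String × Int × Int × Int))) (acc : List String) (idx : Int) :
    chunks.foldl (fun (st : List String × Int) chunk =>
      match chunk with
      | some c => (st.1 ++ [PySem.Str.slice food (some st.2) (some ((PySem.Dict.get? d c.1).getD 0))], c.2.2.2)
      | none => st) (acc, idx)
    = (acc ++ (chunks.foldl (fun (st : List String × Int) chunk =>
      match chunk with
      | some c => (st.1 ++ [PySem.Str.slice food (some st.2) (some ((PySem.Dict.get? d c.1).getD 0))], c.2.2.2)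
      | none => st) ([], idx)).1,
      (chunks.foldl (fun (st : List String × Int) chunk =>
      match chunk with
      | some c => (st.1 ++ [PySem.Str.slice food (some st.2) (some ((PySem.Dict.get? d c.1).getD 0))], c.2.2.2)
      | none => st) ([], idx)).2) := by
  induction chunks generalizing acc idx with
  | nil => simp
  | cons hd tl ih =>
    cases hd with
    | none => simp only [List.foldl_cons]; exact ih acc idx
    | some c =>
      simp only [List.foldl_cons]
      rw [ih (acc ++ _), ih ([] ++ _)]
      simp

-- B's fold: the cut list accumulator only grows by appending
theorem pvFoldB_acc (d : PySem.Dict String Int)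
    (chunks : List (Option (String × Int × Int × Int))) (acc : List Int) :
    chunks.foldl (fun (acc : List Int) chunk =>
      match chunk with
      | some c => acc ++ [(PySem.Dict.get? d c.1).getD 0, c.2.2.2]
      | none => acc) acc
    = acc ++ chunks.foldl (fun (acc : List Int) chunk =>
      match chunk with
      | some c => acc ++ [(PySem.Dict.get? d c.1).getD 0, c.2.2.2]
      | none => acc) [] := by
  induction chunks generalizing acc with
  | nil => simp
  | cons hd tl ih =>
    cases hd with
    | none => simp only [List.foldl_cons]; exact ih acc
    | some c =>
      simp only [List.foldl_cons]
      rw [ih (acc ++ _), ih ([] ++ _)]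
      simp

-- main correspondence: A's bites list followed by the tail slice is exactly the
-- pairwise stitching of the cut table (idx :: flattened-cuts ++ [len food])
theorem pvMain (food : String) (d : PySem.Dict String Int)
    (chunks : List (Option (String × Int × Int × Int))) (idx : Int) :
    (chunks.foldl (fun (st : List String × Int) chunk =>
      match chunk with
      | some c => (st.1 ++ [PySem.Str.slice food (some st.2) (some ((PySem.Dict.get? d c.1).getD 0))], c.2.2.2)
      | none => st) ([], idx)).1
    ++ [PySem.Str.slice food (some (chunks.foldl (fun (st : List String × Int) chunk =>
      match chunk with
      | some c => (st.1 ++ [PySem.Str.slice food (some st.2) (some ((PySem.Dict.get? d c.1).getD 0))], c.2.2.2)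
      | none => st) ([], idx)).2) none]
    = pvPairSlices food (idx :: (chunks.foldl (fun (acc : List Int) chunk =>
      match chunk with
      | some c => acc ++ [(PySem.Dict.get? d c.1).getD 0, c.2.2.2]
      | none => acc) [] ++ [PySem.Str.len food])) := by
  induction chunks generalizing idx with
  | nil =>
    simp [pvPairSlices]
    rw [pvStrSlice_len_eq_none]
  | cons hd tl ih =>
    cases hd with
    | none => simpa using ih idx
    | some c =>
      simp only [List.foldl_cons, List.nil_append]
      rw [pvFoldA_acc food d tl, pvFoldB_acc d tl]
      simp only [List.cons_append, List.nil_append]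
      rw [pvPairSlices, ih c.2.2.2]

-- ===== VERDICT (by name: the statement is the Claim_ definition above) =====
theorem Chew_spec : Claim_equal_Chew := by
  intro chunks grit food _ _
  unfold Spec_Chew
  simp only [Chew, Chew_alt]
  rw [pvFoldB_acc]
  simp only [List.cons_append, List.nil_append]
  exact congrArg (PySem.Str.join "") (pvMain food (PySem.Dict.ofList grit) chunks 0)
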